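-- pv_equiv track=rewrite | github.com/PurpleSensation/PeekPy | PeekPy/peekPy.py | _scan_indent_meta
-- ===== SOURCE A (Python) =====
-- def _scan_indent_meta(lines):
--     """
--     Returns three parallel lists, one entry per *physical* line:
--
--         levels[i]   – logical block depth (0 = top level)
--         paren[i]    – open-bracket depth *after* the line
--         col[i]      – original leading-space column
--
--     Blank / whitespace-only lines get (None, None, None).
--     """
--     stack, levels, paren_depth, cols = [], [], [], []
--     open_count = 0
--
--     for ln in lines:
--         stripped = ln.lstrip()
--         if not stripped:
--             levels.append(None); paren_depth.append(None); cols.append(None)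
--             continue
--
--         col = len(ln) - len(stripped)
--
--         # block logic only if we’re *not* already inside ( … )
--         if open_count == 0:
--             while stack and col < stack[-1]:
--                 stack.pop()
--             if not stack or col > stack[-1]:
--                 stack.append(col)
--
--         # record & update
--         levels.append(len(stack) - 1)
--         cols.append(col)
--         paren_depth.append(open_count)
--
--         # naive but fast bracket balance (ignores strings / comments)
--         open_count += stripped.count('(') + stripped.count('[') + stripped.count('{')
--         open_count -= stripped.count(')') + stripped.count(']') + stripped.count('}')
--
--     return levels, paren_depth, cols
-- ===== SOURCE B (Python) =====
-- def _scan_indent_meta(lines):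
--     """Two-pass re-implementation: first build per-line records (column,
--     bracket delta) with a precomputed paren-balance table, then run the
--     indent-stack logic over the records."""
--     recs = []
--     for ln in lines:
--         s = ln.lstrip()
--         if not s:
--             recs.append(None)
--         else:
--             delta = (s.count('(') + s.count('[') + s.count('{')
--                      - s.count(')') - s.count(']') - s.count('}'))
--             recs.append((len(ln) - len(s), delta))
--
--     paren = []
--     bal = 0
--     for r in recs:
--         if r is None:
--             paren.append(None)
--         else:
--             paren.append(bal)
--             bal += r[1]
--
--     levels, cols, stack = [], [], []
--     for r, p in zip(recs, paren):
--         if r is None: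
--             levels.append(None)
--             cols.append(None)
--         else:
--             col = r[0]
--             if p == 0:
--                 while stack and col < stack[-1]:
--                     stack.pop()
--                 if not stack or col > stack[-1]:
--                     stack.append(col)
--             levels.append(len(stack) - 1)
--             cols.append(col)
--
--     return levels, paren, cols
-- ===== Notes on version B (the rewrite author's own statement) =====
-- stated objective: alternative
-- what changed: Replaces A's single fused loop carrying four accumulators and a running bracket counter by three separate passes: a map producing per-line (column, bracket-delta) records, a prefix-sum pass computing the paren table, and a final stack pass driven by the precomputed records.
import Mathlib
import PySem

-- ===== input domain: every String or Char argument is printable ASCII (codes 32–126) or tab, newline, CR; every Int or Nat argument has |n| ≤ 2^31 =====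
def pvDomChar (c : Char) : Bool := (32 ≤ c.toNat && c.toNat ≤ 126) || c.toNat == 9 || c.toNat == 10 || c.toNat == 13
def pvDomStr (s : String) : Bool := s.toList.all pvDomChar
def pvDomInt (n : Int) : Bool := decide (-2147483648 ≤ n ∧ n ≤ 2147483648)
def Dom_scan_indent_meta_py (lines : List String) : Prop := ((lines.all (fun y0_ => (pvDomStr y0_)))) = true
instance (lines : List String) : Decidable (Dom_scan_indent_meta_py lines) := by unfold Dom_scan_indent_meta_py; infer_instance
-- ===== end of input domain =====

-- B restructures A's single fused loop into three passes (per-line records, a paren prefix table, a stack pass); same results, same cost.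

-- shared small helpers: Python's `while stack and col < stack[-1]: stack.pop()`
-- and `if not stack or col > stack[-1]: stack.append(col)` (stack top at list head)
def pvPop (stack : List Int) (col : Int) : List Int :=
  match stack with
  | [] => []
  | t :: rest => if col < t then pvPop rest col else stack

def pvPush (stack : List Int) (col : Int) : List Int :=
  match stack with
  | [] => [col]
  | t :: _ => if col > t then col :: stack else stack

-- ===== PORT A =====
-- loop body of A's single for-loop; state = (stack, levels, paren_depth, cols, open_count)
def pvStepA (st : List Int × List (Option Int) × List (Option Int) × List (Option Int) × Int)
    (ln : String) : List Int × List (Option Int) × List (Option Int) × List (Option Int) × Int :=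
  let (stack, levels, paren_depth, cols, open_count) := st
  let stripped := PySem.Str.lstrip ln
  if stripped == "" then
    (stack, levels ++ [none], paren_depth ++ [none], cols ++ [none], open_count)
  else
    let col : Int := PySem.Str.len ln - PySem.Str.len stripped
    let stack := if open_count == 0 then pvPush (pvPop stack col) col else stack
    let open_count' := open_count
      + ((PySem.Str.count stripped "(" : Int) + (PySem.Str.count stripped "[" : Int)
         + (PySem.Str.count stripped "{" : Int))
      - ((PySem.Str.count stripped ")" : Int) + (PySem.Str.count stripped "]" : Int)
         + (PySem.Str.count stripped "}" : Int))
    (stack, levels ++ [some ((stack.length : Int) - 1)],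
     paren_depth ++ [some open_count], cols ++ [some col], open_count')

def scan_indent_meta_py (lines : List String) : List (Option Int) × List (Option Int) × List (Option Int) :=
  let fin := lines.foldl pvStepA ([], [], [], [], 0)
  (fin.2.1, fin.2.2.1, fin.2.2.2.1)

-- ===== PORT B =====
-- pass 1: per-line record: none for blank, otherwise (column, net bracket delta)
def pvClassify (ln : String) : Option (Int × Int) :=
  let s := PySem.Str.lstrip ln
  if s == "" then none
  else some (PySem.Str.len ln - PySem.Str.len s,
    ((PySem.Str.count s "(" : Int) + (PySem.Str.count s "[" : Int) + (PySem.Str.count s "{" : Int))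
    - ((PySem.Str.count s ")" : Int) + (PySem.Str.count s "]" : Int) + (PySem.Str.count s "}" : Int)))

-- pass 2 loop body: reversed paren table + running balance
def pvStepP (acc : List (Option Int) × Int) (r : Option (Int × Int)) : List (Option Int) × Int :=
  match r with
  | none => (none :: acc.1, acc.2)
  | some (_, d) => (some acc.2 :: acc.1, acc.2 + d)

-- pass 3 loop body: reversed levels, reversed cols, indent stack
def pvStepZ (acc : List (Option Int) × List (Option Int) × List Int)
    (rp : Option (Int × Int) × Option Int) : List (Option Int) × List (Option Int) × List Int :=
  match rp.1 with
  | none => (none :: acc.1, none :: acc.2.1, acc.2.2)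
  | some (col, _) =>
    let stack := if rp.2 == some 0 then pvPush (pvPop acc.2.2 col) col else acc.2.2
    (some ((stack.length : Int) - 1) :: acc.1, some col :: acc.2.1, stack)

def scan_indent_meta_py_alt (lines : List String) : List (Option Int) × List (Option Int) × List (Option Int) :=
  let recs := lines.map pvClassify
  let paren := (recs.foldl pvStepP ([], 0)).1.reverse
  let fin := (recs.zip paren).foldl pvStepZ ([], [], [])
  (fin.1.reverse, paren, fin.2.1.reverse)

-- ===== PRECONDITION & SPEC =====
def Spec_scan_indent_meta_py (lines : List String) (out : List (Option Int) × List (Option Int) × List (Option Int)) : Prop := out = scan_indent_meta_py_alt lines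
instance (lines : List String) (out : List (Option Int) × List (Option Int) × List (Option Int)) : Decidable (Spec_scan_indent_meta_py lines out) := by unfold Spec_scan_indent_meta_py; infer_instance

-- ===== CLAIM (what is proved, stated in full; the proofs are below) =====
def Claim_equal_scan_indent_meta_py : Prop := ∀ (lines : List String), Dom_scan_indent_meta_py lines → Spec_scan_indent_meta_py lines (scan_indent_meta_py lines)

-- ===== LEMMAS AND PROOFS =====

-- reference recursion over the records: (levels, paren, cols) built by cons
def pvGo (stack : List Int) (oc : Int) : List (Option (Int × Int)) → List (Option Int) × List (Option Int) × List (Option Int)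
  | [] => ([], [], [])
  | none :: rs =>
    let t := pvGo stack oc rs
    (none :: t.1, none :: t.2.1, none :: t.2.2)
  | some (col, d) :: rs =>
    let stack' := if oc == 0 then pvPush (pvPop stack col) col else stack
    let t := pvGo stack' (oc + d) rs
    (some ((stack'.length : Int) - 1) :: t.1, some oc :: t.2.1, some col :: t.2.2)

-- the paren table as a direct recursion
def pvParenL (bal : Int) : List (Option (Int × Int)) → List (Option Int)
  | [] => []
  | none :: rs => none :: pvParenL bal rs
  | some (_, d) :: rs => some bal :: pvParenL (bal + d) rs

theorem pvParenL_eq_go (rs : List (Option (Int × Int))) (stack : List Int) (bal : Int) :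
    pvParenL bal rs = (pvGo stack bal rs).2.1 := by
  induction rs generalizing stack bal with
  | nil => rfl
  | cons r rs ih =>
    match r with
    | none => simp only [pvParenL, pvGo]; rw [ih]
    | some (col, d) => simp only [pvParenL, pvGo]; rw [ih]

theorem pv_paren_fold (rs : List (Option (Int × Int))) (a : List (Option Int)) (bal : Int) :
    (rs.foldl pvStepP (a, bal)).1 = (pvParenL bal rs).reverse ++ a := by
  induction rs generalizing a bal with
  | nil => simp [pvParenL]
  | cons r rs ih =>
    match r with
    | none => simp [pvParenL, pvStepP, List.foldl, ih]
    | some (col, d) => simp [pvParenL, pvStepP, List.foldl, ih]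

theorem pv_zip_fold (rs : List (Option (Int × Int))) (stack : List Int) (bal : Int)
    (l c : List (Option Int)) :
    ((rs.zip (pvParenL bal rs)).foldl pvStepZ (l, c, stack)).1
        = (pvGo stack bal rs).1.reverse ++ l
    ∧ ((rs.zip (pvParenL bal rs)).foldl pvStepZ (l, c, stack)).2.1
        = (pvGo stack bal rs).2.2.reverse ++ c := by
  induction rs generalizing stack bal l c with
  | nil => simp [pvParenL, pvGo]
  | cons r rs ih =>
    match r with
    | none =>
      simpa [pvParenL, pvGo, pvStepZ, List.zip, List.foldl] using
        ih stack bal (none :: l) (none :: c)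
    | some (col, d) =>
      by_cases h : bal = 0
      · subst h
        simpa [pvParenL, pvGo, pvStepZ, List.zip, List.foldl] using
          ih (pvPush (pvPop stack col) col) (0 + d) _ _
      · simpa [pvParenL, pvGo, pvStepZ, List.zip, List.foldl, h] using ih stack (bal + d) _ _

theorem pv_A_fold (lines : List String) (stack : List Int) (oc : Int)
    (L P C : List (Option Int)) :
    (lines.foldl pvStepA (stack, L, P, C, oc)).2.1
        = L ++ (pvGo stack oc (lines.map pvClassify)).1
    ∧ (lines.foldl pvStepA (stack, L, P, C, oc)).2.2.1
        = P ++ (pvGo stack oc (lines.map pvClassify)).2.1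
    ∧ (lines.foldl pvStepA (stack, L, P, C, oc)).2.2.2.1
        = C ++ (pvGo stack oc (lines.map pvClassify)).2.2 := by
  induction lines generalizing stack oc L P C with
  | nil => simp [pvGo]
  | cons ln rest ih =>
    by_cases h : PySem.Str.lstrip ln == ""
    · simp only [List.map_cons, List.foldl_cons, pvStepA, pvClassify, h, if_pos, pvGo]
      refine ⟨?_, ?_, ?_⟩
      · rw [(ih _ _ _ _ _).1]; simp
      · rw [(ih _ _ _ _ _).2.1]; simp
      · rw [(ih _ _ _ _ _).2.2]; simp
    · simp only [List.map_cons, List.foldl_cons, pvStepA, pvClassify, h, if_neg,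
        Bool.not_eq_true, pvGo]
      refine ⟨?_, ?_, ?_⟩
      · rw [(ih _ _ _ _ _).1]; simp [add_sub_assoc]
      · rw [(ih _ _ _ _ _).2.1]; simp [add_sub_assoc]
      · rw [(ih _ _ _ _ _).2.2]; simp [add_sub_assoc]

-- ===== VERDICT (by name: the statement is the Claim_ definition above) =====
theorem scan_indent_meta_py_spec : Claim_equal_scan_indent_meta_py := by
  intro lines _
  show scan_indent_meta_py lines = scan_indent_meta_py_alt lines
  unfold scan_indent_meta_py scan_indent_meta_py_alt
  obtain ⟨hA1, hA2, hA3⟩ := pv_A_fold lines [] 0 [] [] []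
  obtain ⟨hZ1, hZ2⟩ := pv_zip_fold (lines.map pvClassify) [] 0 [] []
  simp only [hA1, hA2, hA3, List.nil_append]
  rw [pv_paren_fold (lines.map pvClassify) [] 0]
  simp only [List.append_nil, List.reverse_reverse]
  rw [hZ1, hZ2]
  simp [pvParenL_eq_go (lines.map pvClassify) [] 0]
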